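-- pv_equiv track=rewrite | github.com/vinayswamik/wisq | src/wisq/sarouting.py | get_dependent_gates
-- ===== SOURCE A (Python) =====
-- def get_dependent_gates(gate_tuple, remaining):
--     id, initial_gate = gate_tuple
--     dependent = {}
--     dependent[id] = initial_gate
--     for id,gate in remaining.items():
--
--         if any(depends_on((id,gate), added) for added in dependent.items()):
--             dependent[id] = gate
--
--     return dependent
--
-- def depends_on(g1, g2):
--     return g1[0] > g2[0] and len(set(g1[1]).intersection(g2[1])) > 0
-- ===== SOURCE B (Python) =====
-- def get_dependent_gates(gate_tuple, remaining):
--     gid, initial_gate = gate_tuple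
--     dependent = {gid: initial_gate}
--     # min_id[q] = smallest gate id among collected gates that touch qubit q
--     min_id = {q: gid for q in initial_gate}
--     for id, gate in remaining.items():
--         if any(q in min_id and min_id[q] < id for q in gate):
--             dependent[id] = gate
--             for q in gate:
--                 if q not in min_id or id < min_id[q]:
--                     min_id[q] = id
--     return dependent
-- ===== Notes on version B (the rewrite author's own statement) =====
-- stated objective: faster
-- what changed: Instead of re-scanning every already-collected gate for each candidate (any(depends_on(...)) over dependent.items()), B maintains a per-qubit dictionary of the minimum collected gate id touching that qubit, so each candidate is tested and the index updated in O(|gate|) hash lookups.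
import Mathlib
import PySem

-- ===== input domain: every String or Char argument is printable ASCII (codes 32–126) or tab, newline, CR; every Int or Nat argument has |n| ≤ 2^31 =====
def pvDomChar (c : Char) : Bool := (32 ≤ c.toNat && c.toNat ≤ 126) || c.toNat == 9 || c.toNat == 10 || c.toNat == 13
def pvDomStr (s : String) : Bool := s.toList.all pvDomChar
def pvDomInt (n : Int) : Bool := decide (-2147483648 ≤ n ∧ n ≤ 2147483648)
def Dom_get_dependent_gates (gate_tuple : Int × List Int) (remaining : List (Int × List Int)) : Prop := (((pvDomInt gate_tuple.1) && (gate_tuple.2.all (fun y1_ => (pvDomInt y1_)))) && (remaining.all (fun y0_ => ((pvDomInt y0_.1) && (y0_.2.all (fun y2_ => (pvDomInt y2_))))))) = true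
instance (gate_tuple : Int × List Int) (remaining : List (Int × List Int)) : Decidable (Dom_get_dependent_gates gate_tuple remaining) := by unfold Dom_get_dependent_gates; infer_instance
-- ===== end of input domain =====

-- B replaces A's inner scan over all collected gates by a per-qubit minimum-collected-id dictionary,
-- turning the quadratic collect loop into a single pass (objective: faster).

-- ===== PORT A =====
def pvDependsOn (g1 g2 : Int × List Int) : Bool :=
  decide (g1.1 > g2.1) && decide (0 < PySem.Set.len (PySem.Set.inter (PySem.Set.ofList g1.2) g2.2))

def pvStepA (dep : PySem.Dict Int (List Int)) (p : Int × List Int) : PySem.Dict Int (List Int) :=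
  if dep.items.any (fun added => pvDependsOn p added) then dep.insert p.1 p.2 else dep

def get_dependent_gates (gate_tuple : Int × List Int) (remaining : List (Int × List Int)) : List (Int × List Int) :=
  let dependent : PySem.Dict Int (List Int) := PySem.Dict.empty.insert gate_tuple.1 gate_tuple.2
  (remaining.foldl pvStepA dependent).items

-- ===== PORT B =====
-- any(q in min_id and min_id[q] < id for q in gate)
def pvHasSmaller (m : PySem.Dict Int Int) (id : Int) (gate : List Int) : Bool :=
  gate.any (fun q => match m.get? q with | some v => decide (v < id) | none => false)

-- for q in gate: if q not in min_id or id < min_id[q]: min_id[q] = id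
def pvUpdMin (m : PySem.Dict Int Int) (id : Int) (gate : List Int) : PySem.Dict Int Int :=
  gate.foldl (fun m q => match m.get? q with
    | none => m.insert q id
    | some v => if id < v then m.insert q id else m) m

def pvStepB (st : PySem.Dict Int (List Int) × PySem.Dict Int Int) (p : Int × List Int) :
    PySem.Dict Int (List Int) × PySem.Dict Int Int :=
  if pvHasSmaller st.2 p.1 p.2 then (st.1.insert p.1 p.2, pvUpdMin st.2 p.1 p.2) else st

def get_dependent_gates_alt (gate_tuple : Int × List Int) (remaining : List (Int × List Int)) : List (Int × List Int) :=
  let dependent : PySem.Dict Int (List Int) := PySem.Dict.empty.insert gate_tuple.1 gate_tuple.2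
  let minId : PySem.Dict Int Int :=
    gate_tuple.2.foldl (fun m q => m.insert q gate_tuple.1) PySem.Dict.empty
  (remaining.foldl pvStepB (dependent, minId)).1.items

-- ===== PRECONDITION & SPEC =====
-- Pre_ excludes remaining lists with duplicate ids: a Python dict (remaining's type) cannot hold
-- duplicate keys, so such lists encode no dict input; on them A's overwrite order is accidental.
def Pre_get_dependent_gates (gate_tuple : Int × List Int) (remaining : List (Int × List Int)) : Prop :=
  (remaining.map Prod.fst).Nodup

instance (gate_tuple : Int × List Int) (remaining : List (Int × List Int)) : Decidable (Pre_get_dependent_gates gate_tuple remaining) := by unfold Pre_get_dependent_gates; infer_instance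

def pvWitness_get_dependent_gates : (Int × List Int) × (List (Int × List Int)) :=
  ((1, [0]), [(2, [0, 1]), (3, [1]), (7, [5])])

def Spec_get_dependent_gates (gate_tuple : Int × List Int) (remaining : List (Int × List Int)) (out : List (Int × List Int)) : Prop := out = get_dependent_gates_alt gate_tuple remaining
instance (gate_tuple : Int × List Int) (remaining : List (Int × List Int)) (out : List (Int × List Int)) : Decidable (Spec_get_dependent_gates gate_tuple remaining out) := by unfold Spec_get_dependent_gates; infer_instance

-- ===== CLAIM (what is proved, stated in full; the proofs are below) =====
def Claim_equal_get_dependent_gates : Prop := ∀ (gate_tuple : Int × List Int) (remaining : List (Int × List Int)), Dom_get_dependent_gates gate_tuple remaining → Pre_get_dependent_gates gate_tuple remaining → Spec_get_dependent_gates gate_tuple remaining (get_dependent_gates gate_tuple remaining)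

-- ===== LEMMAS AND PROOFS =====

-- min of an optional previous minimum and a new id
def pvMMin (o : Option Int) (id : Int) : Int := match o with | none => id | some v => min v id

-- the minimum collected id touching qubit q, over a list of collected items
def pvMinIdOf (L : List (Int × List Int)) (q : Int) : Option Int :=
  L.foldl (fun o p => if q ∈ p.2 then some (pvMMin o p.1) else o) none

theorem pvMinIdOf_append (L : List (Int × List Int)) (p : Int × List Int) (q : Int) :
    pvMinIdOf (L ++ [p]) q = if q ∈ p.2 then some (pvMMin (pvMinIdOf L q) p.1) else pvMinIdOf L q := by
  simp [pvMinIdOf, List.foldl_append]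

theorem pvMinIdOf_none (L : List (Int × List Int)) (q : Int) :
    pvMinIdOf L q = none ↔ ∀ p ∈ L, q ∉ p.2 := by
  induction L using List.reverseRecOn with
  | nil => simp [pvMinIdOf]
  | append_singleton L p ih =>
    rw [pvMinIdOf_append]
    by_cases hq : q ∈ p.2 <;> simp [hq, ih]
    · exact ⟨p.1, p.2, Or.inr rfl, hq⟩
    · constructor
      · rintro h a b (h1 | h1)
        · exact h a b h1
        · exact fun hb => hq (by rw [← h1]; exact hb)
      · exact fun h a b hab => h a b (Or.inl hab)

theorem pvMinIdOf_mem {L : List (Int × List Int)} {q v : Int} (h : pvMinIdOf L q = some v) :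
    ∃ p ∈ L, q ∈ p.2 ∧ p.1 = v := by
  induction L using List.reverseRecOn generalizing v with
  | nil => simp [pvMinIdOf] at h
  | append_singleton L p ih =>
    rw [pvMinIdOf_append] at h
    by_cases hq : q ∈ p.2
    · simp only [hq, if_pos, Option.some.injEq] at h
      cases ho : pvMinIdOf L q with
      | none => exact ⟨p, by simp, hq, by simp [ho, pvMMin] at h; omega⟩
      | some w =>
        rcases ih ho with ⟨p', hp', hq', hv'⟩
        simp only [ho, pvMMin] at h
        rcases le_total w p.1 with hle | hle
        · exact ⟨p', by simp [hp'], hq', by omega⟩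
        · exact ⟨p, by simp, hq, by omega⟩
    · simp only [hq, if_neg, not_false_iff] at h
      rcases ih h with ⟨p', hp', hq', hv'⟩
      exact ⟨p', by simp [hp'], hq', hv'⟩

theorem pvMinIdOf_le {L : List (Int × List Int)} {q v : Int} (h : pvMinIdOf L q = some v) :
    ∀ p ∈ L, q ∈ p.2 → v ≤ p.1 := by
  induction L using List.reverseRecOn generalizing v with
  | nil => simp
  | append_singleton L p ih =>
    rw [pvMinIdOf_append] at h
    intro p' hp' hq'
    rcases (List.mem_append.mp hp') with hp' | hp'
    · by_cases hq : q ∈ p.2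
      · simp only [hq, if_pos, Option.some.injEq] at h
        cases ho : pvMinIdOf L q with
        | none => exact absurd hq' ((pvMinIdOf_none L q).mp ho p' hp')
        | some w =>
          have := ih ho p' hp' hq'
          simp [ho, pvMMin] at h; omega
      · simp only [hq, if_neg, not_false_iff] at h
        exact ih h p' hp' hq'
    · have hp : p' = p := by simpa using hp'
      subst hp
      by_cases hq : q ∈ p'.2
      · simp only [hq, if_pos, Option.some.injEq] at h
        cases ho : pvMinIdOf L q <;> simp [ho, pvMMin] at h <;> omega
      · exact absurd hq' hq

-- get? after B's update loop over one gate
theorem pvMMin_idem (o : Option Int) (id : Int) :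
    pvMMin (some (pvMMin o id)) id = pvMMin o id := by
  cases o <;> simp [pvMMin]

-- get? after B's update loop over one gate
theorem pvUpdMin_get? (gate : List Int) (m : PySem.Dict Int Int) (id q : Int) :
    (pvUpdMin m id gate).get? q = if q ∈ gate then some (pvMMin (m.get? q) id) else m.get? q := by
  induction gate generalizing m with
  | nil => simp [pvUpdMin]
  | cons x rest ih =>
    have hstep : (match m.get? x with
        | none => m.insert x id
        | some v => if id < v then m.insert x id else m).get? q
        = if q = x then some (pvMMin (m.get? x) id) else m.get? q := by
      cases hx : m.get? x with
      | none => simp [PySem.Dict.get?_insert, pvMMin]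
      | some v =>
        by_cases hlt : id < v
        · simp only [hlt, if_pos]
          rw [PySem.Dict.get?_insert]
          by_cases hqx : q = x
          · simp [hqx, pvMMin]; omega
          · simp [hqx]
        · simp only [hlt, if_neg, not_false_iff]
          by_cases hqx : q = x
          · simp [hqx, hx, pvMMin, min_eq_left (by omega : v ≤ id)]
          · simp [hqx]
    show (pvUpdMin _ id rest).get? q = _
    rw [ih, hstep]
    by_cases hqx : q = x
    · subst hqx
      by_cases hqr : q ∈ rest <;> simp [hqr, pvMMin_idem]
    · by_cases hqr : q ∈ rest <;> simp [hqr, hqx]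

-- get? after the dict-comprehension initialisation {q: gid for q in g}
theorem pvInit_get? (g : List Int) (m : PySem.Dict Int Int) (gid q : Int) :
    (g.foldl (fun m q => m.insert q gid) m).get? q = if q ∈ g then some gid else m.get? q := by
  induction g generalizing m with
  | nil => simp
  | cons x rest ih =>
    show (rest.foldl _ (m.insert x gid)).get? q = _
    rw [ih, PySem.Dict.get?_insert]
    by_cases hqr : q ∈ rest <;> by_cases hqx : q = x <;> simp [hqr, hqx, List.mem_cons]

-- A's any-scan over the collected items equals B's per-qubit lookup, under the invariant
theorem pvCond_eq (dep : PySem.Dict Int (List Int)) (m : PySem.Dict Int Int)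
    (id : Int) (gate : List Int)
    (hinv : ∀ q, m.get? q = pvMinIdOf dep.items q) :
    (dep.items.any (fun added => pvDependsOn (id, gate) added)) = pvHasSmaller m id gate := by
  rw [Bool.eq_iff_iff]
  simp only [List.any_eq_true, pvDependsOn, pvHasSmaller, Bool.and_eq_true, decide_eq_true_eq]
  constructor
  · rintro ⟨added, hmem, hgt, hlen⟩
    have hlen' : 0 < ((PySem.Set.ofList gate).inter added.2).length := by
      simp only [PySem.Set.len] at hlen; exact_mod_cast hlen
    rcases List.length_pos_iff_exists_mem.mp hlen' with ⟨x, hx⟩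
    rw [PySem.Set.mem_inter, PySem.Set.mem_ofList] at hx
    refine ⟨x, hx.1, ?_⟩
    cases ho : m.get? x with
    | none =>
      rw [hinv x] at ho
      exact absurd hx.2 ((pvMinIdOf_none _ _).mp ho added hmem)
    | some v =>
      rw [hinv x] at ho
      have hle := pvMinIdOf_le ho added hmem hx.2
      simp only [decide_eq_true_eq]
      simp only [GT.gt] at hgt
      omega
  · rintro ⟨q, hq, hmatch⟩
    cases ho : m.get? q with
    | none => rw [ho] at hmatch; simp at hmatch
    | some v =>
      rw [ho] at hmatch
      simp only [decide_eq_true_eq] at hmatch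
      rw [hinv q] at ho
      rcases pvMinIdOf_mem ho with ⟨p', hmem, hqg, hav⟩
      refine ⟨p', hmem, by simp only [GT.gt]; omega, ?_⟩
      have hx : q ∈ (PySem.Set.ofList gate).inter p'.2 := by
        rw [PySem.Set.mem_inter, PySem.Set.mem_ofList]; exact ⟨hq, hqg⟩
      have hpos := List.length_pos_of_mem hx
      simp only [PySem.Set.len]; exact_mod_cast hpos

-- main lockstep loop lemma
theorem pvLoop_eq (id0 : Int) :
    ∀ (rem : List (Int × List Int)) (dep : PySem.Dict Int (List Int)) (m : PySem.Dict Int Int),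
    dep.keys.Nodup →
    (∀ k ∈ dep.keys, id0 ≤ k) →
    (∀ p ∈ rem, p.1 = id0 ∨ p.1 ∉ dep.keys) →
    (rem.map Prod.fst).Nodup →
    (∀ q, m.get? q = pvMinIdOf dep.items q) →
    rem.foldl pvStepA dep = (rem.foldl pvStepB (dep, m)).1
  | [], dep, m, _, _, _, _, _ => rfl
  | p :: rem, dep, m, hnd, hge, hfresh, hremnd, hinv => by
    have hcond := pvCond_eq dep m p.1 p.2 hinv
    by_cases hc : pvHasSmaller m p.1 p.2 = true
    · -- the gate is collected by both
      have hAcond : dep.items.any (fun added => pvDependsOn p added) = true := by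
        rw [show (fun added => pvDependsOn p added) = (fun added => pvDependsOn (p.1, p.2) added) by
          funext added; rfl]
        rw [hcond]; exact hc
      -- from the condition, some collected id is < p.1, hence id0 < p.1
      have hgt0 : id0 < p.1 := by
        simp only [pvHasSmaller, List.any_eq_true] at hc
        rcases hc with ⟨q, _, hq⟩
        cases ho : m.get? q with
        | none => rw [ho] at hq; simp at hq
        | some v =>
          rw [ho] at hq; simp at hq
          rw [hinv q] at ho
          rcases pvMinIdOf_mem ho with ⟨p', hp', _, hv⟩
          have := hge p'.1 (PySem.Dict.mem_keys_of_mem_items _ hp')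
          omega
      have hnotmem : p.1 ∉ dep.keys := by
        rcases hfresh p (by simp) with h | h
        · omega
        · exact h
      have hcontains : dep.contains p.1 = false :=
        Bool.eq_false_iff.mpr (fun h => hnotmem ((PySem.Dict.contains_iff_mem_keys _ _).mp h))
      have hkeys : (dep.insert p.1 p.2).keys = dep.keys ++ [p.1] :=
        PySem.Dict.keys_insert_of_not_contains _ _ hcontains
      have hitems : (dep.insert p.1 p.2).items = dep.items ++ [(p.1, p.2)] :=
        PySem.Dict.items_insert_of_not_contains _ _ hcontains
      show List.foldl pvStepA (pvStepA dep p) rem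
          = (List.foldl pvStepB (pvStepB (dep, m) p) rem).1
      rw [show pvStepA dep p = dep.insert p.1 p.2 by simp [pvStepA, hAcond],
          show pvStepB (dep, m) p = (dep.insert p.1 p.2, pvUpdMin m p.1 p.2) by
            simp [pvStepB, hc]]
      apply pvLoop_eq id0 rem
      · exact PySem.Dict.nodup_keys_insert _ _ _ hnd
      · intro k hk
        rw [hkeys] at hk
        rcases List.mem_append.mp hk with h | h
        · exact hge k h
        · simp at h; omega
      · intro p' hp'
        rcases hfresh p' (by simp [hp']) with h | h
        · exact Or.inl h
        · right
          rw [hkeys, List.mem_append]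
          rintro (h' | h')
          · exact h h'
          · simp at h'
            simp only [List.map_cons, List.nodup_cons] at hremnd
            exact hremnd.1 (by rw [← h']; exact List.mem_map_of_mem hp')
      · simp only [List.map_cons, List.nodup_cons] at hremnd; exact hremnd.2
      · intro q
        rw [pvUpdMin_get?, hitems, pvMinIdOf_append, hinv q]
    · -- the gate is skipped by both
      have hc' : pvHasSmaller m p.1 p.2 = false := Bool.eq_false_iff.mpr hc
      have hAcond : dep.items.any (fun added => pvDependsOn p added) = false := by
        rw [show (fun added => pvDependsOn p added) = (fun added => pvDependsOn (p.1, p.2) added) by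
          funext added; rfl]
        rw [hcond]; exact hc'
      show List.foldl pvStepA (pvStepA dep p) rem
          = (List.foldl pvStepB (pvStepB (dep, m) p) rem).1
      rw [show pvStepA dep p = dep by simp [pvStepA, hAcond],
          show pvStepB (dep, m) p = (dep, m) by simp [pvStepB, hc']]
      exact pvLoop_eq id0 rem dep m hnd hge
        (fun p' hp' => hfresh p' (by simp [hp']))
        (by simp only [List.map_cons, List.nodup_cons] at hremnd; exact hremnd.2) hinv

-- ===== VERDICT (by name: the statement is the Claim_ definition above) =====
theorem get_dependent_gates_spec : Claim_equal_get_dependent_gates := by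
  intro gate_tuple remaining _hdom hpre
  unfold Spec_get_dependent_gates get_dependent_gates get_dependent_gates_alt
  have hkeys0 : (PySem.Dict.empty.insert gate_tuple.1 gate_tuple.2 :
      PySem.Dict Int (List Int)).keys = [gate_tuple.1] := by
    rw [PySem.Dict.keys_insert_of_not_contains _ _ (by simp [PySem.Dict.contains_empty])]
    simp [PySem.Dict.keys_empty]
  have hitems0 : (PySem.Dict.empty.insert gate_tuple.1 gate_tuple.2 :
      PySem.Dict Int (List Int)).items = [(gate_tuple.1, gate_tuple.2)] := by
    rw [PySem.Dict.items_insert_of_not_contains _ _ (by simp [PySem.Dict.contains_empty])]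
    rfl
  show (List.foldl pvStepA (PySem.Dict.empty.insert gate_tuple.1 gate_tuple.2) remaining).items
      = (List.foldl pvStepB (PySem.Dict.empty.insert gate_tuple.1 gate_tuple.2,
          List.foldl (fun m q => m.insert q gate_tuple.1) PySem.Dict.empty gate_tuple.2)
          remaining).1.items
  rw [← pvLoop_eq gate_tuple.1 remaining _ _]
  · rw [hkeys0]; simp
  · intro k hk; rw [hkeys0] at hk; simp at hk; omega
  · intro p _; rw [hkeys0]; by_cases h : p.1 = gate_tuple.1
    · exact Or.inl h
    · right; simp [h]
  · exact hpre
  · intro q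
    rw [pvInit_get?, hitems0]
    by_cases hq : q ∈ gate_tuple.2 <;> simp [pvMinIdOf, pvMMin, hq]
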